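-- pv_equiv track=rewrite | github.com/Visqy/stagecoach-solver-gui | stagecoach.py | reconstruct_all_paths
-- ===== SOURCE A (Python) =====
-- from typing import Dict, List, Tuple, Optional
--
-- def reconstruct_all_paths(policy: Dict[str, List[str]], start: str, goal: str) -> List[List[str]]:
--     """Kembalikan semua path optimal dari start ke goal berdasarkan policy."""
--     paths: List[List[str]] = []
--
--     def dfs(u: str, current: List[str]):
--         if u == goal:
--             paths.append(current.copy())
--             return
--         for v in policy.get(u, []):
--             dfs(v, current + [v])
--
--     dfs(start, [start])
--     return paths
-- ===== SOURCE B (Python) =====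
-- from typing import Dict, List
--
-- def reconstruct_all_paths(policy: Dict[str, List[str]], start: str, goal: str) -> List[List[str]]:
--     """Iterative DFS driven by an explicit stack of (node, path) pairs
--     instead of A's recursive dfs with a shared accumulator."""
--     paths: List[List[str]] = []
--     stack = [(start, [start])]
--     while stack:
--         u, path = stack.pop()
--         if u == goal:
--             paths.append(path)
--         else:
--             for v in reversed(policy.get(u, [])):
--                 stack.append((v, path + [v]))
--     return paths
-- ===== Notes on version B (the rewrite author's own statement) =====
-- stated objective: alternative
-- what changed: A's recursive inner dfs threading a prefix and mutating an outer accumulator is replaced by an iterative while-loop over an explicit stack of (node, path) pairs, pushing successors in reversed order to keep A's depth-first output order.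
import Mathlib
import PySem

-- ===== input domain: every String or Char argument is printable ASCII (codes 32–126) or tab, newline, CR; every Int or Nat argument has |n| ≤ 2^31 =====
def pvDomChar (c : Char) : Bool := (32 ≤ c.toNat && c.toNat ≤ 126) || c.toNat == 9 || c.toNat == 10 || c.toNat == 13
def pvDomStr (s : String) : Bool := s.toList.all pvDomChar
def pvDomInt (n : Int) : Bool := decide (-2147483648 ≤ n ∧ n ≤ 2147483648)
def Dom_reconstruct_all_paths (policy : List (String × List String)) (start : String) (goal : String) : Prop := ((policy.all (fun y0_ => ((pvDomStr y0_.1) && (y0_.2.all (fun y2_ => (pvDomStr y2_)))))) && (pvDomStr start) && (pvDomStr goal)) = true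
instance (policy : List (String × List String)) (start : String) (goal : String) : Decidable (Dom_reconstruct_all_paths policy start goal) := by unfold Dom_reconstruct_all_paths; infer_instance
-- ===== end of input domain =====

-- B replaces A's recursive dfs (shared accumulator, threaded prefix) by an
-- iterative loop over an explicit stack of (node, path) pairs (objective: alternative).


-- policy.get(u, []) — first match (Python dicts have unique keys)
def pvPolGet (policy : List (String × List String)) (u : String) : List String :=
  ((policy.find? (fun kv => kv.1 == u)).map (·.2)).getD []

-- ===== PORT A =====
-- A's inner dfs: outer accumulator `paths`, current prefix `current`. The fuel
-- argument is only a totality device: under Pre_ (A terminates) every chain of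
-- expansions visits distinct non-goal keys, so its depth is ≤ policy.length
-- and the fuel guard (fuel exhausted ⇒ return the accumulator) never fires.
def pvDfsA (policy : List (String × List String)) (goal : String)
    (f : Nat) (u : String) (current : List String)
    (paths : List (List String)) : List (List String) :=
  if u = goal then paths ++ [current]
  else
    match f with
    | 0 => paths
    | f' + 1 =>
      (pvPolGet policy u).foldl
        (fun acc v => pvDfsA policy goal f' v (current ++ [v]) acc) paths

def reconstruct_all_paths (policy : List (String × List String)) (start : String) (goal : String) : List (List String) :=
  pvDfsA policy goal (policy.length + 1) start [start] []

-- ===== PORT B =====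
-- B's while-loop over a stack of (node, path) pairs; the Lean stack's HEAD is
-- the Python list's END (the pop side), so `for v in reversed(...): stack.append(...)`
-- is a foldl over the reversed successor list that conses onto the stack.
-- Each entry additionally carries fuel (same totality device as in port A;
-- the 0-case never fires under Pre_).  pvK bounds a successor list's length +1
-- and only serves the termination measure.
def pvK (policy : List (String × List String)) : Nat :=
  (policy.map (fun kv => kv.2.length)).foldr Nat.max 0 + 1

theorem pvPolGet_len_lt (policy : List (String × List String)) (u : String) :
    (pvPolGet policy u).length < pvK policy := by
  unfold pvPolGet pvK
  cases h : policy.find? (fun kv => kv.1 == u) with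
  | none => simp
  | some kv =>
    have hmem := List.mem_of_find?_eq_some h
    simp only [Option.map_some, Option.getD_some]
    have key : ∀ (l : List (String × List String)), kv ∈ l →
        kv.2.length ≤ (l.map (fun kv => kv.2.length)).foldr Nat.max 0 := by
      intro l hl
      induction l with
      | nil => simp at hl
      | cons p t ih =>
        simp only [List.map_cons, List.foldr_cons]
        rcases List.mem_cons.mp hl with rfl | hm
        · exact Nat.le_max_left _ _
        · exact le_trans (ih hm) (Nat.le_max_right _ _)
    have := key policy hmem
    omega

theorem pvStackSum_push (policy : List (String × List String))
    (mk : String → Nat × String × List String) (w : Nat) (hw : ∀ v, (mk v).1 = w) :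
    ∀ (l : List String) (st : List (Nat × String × List String)),
      ((l.foldl (fun st v => mk v :: st) st).map (fun e => pvK policy ^ e.1)).sum
        = l.length * pvK policy ^ w + ((st.map (fun e => pvK policy ^ e.1)).sum) := by
  intro l
  induction l with
  | nil => intro st; simp
  | cons v t ih =>
    intro st
    simp only [List.foldl_cons, ih, List.map_cons, List.sum_cons, List.length_cons, hw]
    ring

def pvRunB (policy : List (String × List String)) (goal : String) :
    List (Nat × String × List String) → List (List String)
  | [] => []
  | (f, u, path) :: rest =>
    if u = goal then path :: pvRunB policy goal rest
    else
      match f with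
      | 0 => pvRunB policy goal rest
      | f' + 1 =>
        pvRunB policy goal
          ((pvPolGet policy u).reverse.foldl
            (fun st v => (f', v, path ++ [v]) :: st) rest)
termination_by st => ((st.map (fun e => pvK policy ^ e.1)).sum)
decreasing_by
  · have : 0 < pvK policy ^ f := pow_pos (by unfold pvK; omega) f
    simp only [List.map_cons, List.sum_cons]; omega
  · have : 0 < pvK policy ^ 0 := pow_pos (by unfold pvK; omega) 0
    simp only [List.map_cons, List.sum_cons]; omega
  · rw [pvStackSum_push policy (fun v => (f', v, path ++ [v])) f' (fun _ => rfl)]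
    simp only [List.map_cons, List.sum_cons, List.length_reverse, pow_succ]
    have hlt := pvPolGet_len_lt policy u
    have hp : 0 < pvK policy ^ f' := pow_pos (by unfold pvK; omega) f'
    have := (Nat.mul_lt_mul_right hp).mpr hlt
    have h2 : pvK policy * pvK policy ^ f' = pvK policy ^ f' * pvK policy := Nat.mul_comm _ _
    omega

def reconstruct_all_paths_alt (policy : List (String × List String)) (start : String) (goal : String) : List (List String) :=
  pvRunB policy goal [(policy.length + 1, start, [start])]

-- ===== PRECONDITION & SPEC =====
-- Pre_ holds exactly when Python A terminates: no node reachable from start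
-- (with goal acting as a sink, since dfs returns at goal) lies on a goal-free
-- cycle; otherwise A's recursion is infinite (RecursionError) and B's loop
-- does not terminate either.  pvClosure is plain breadth-first closure of a
-- seed set under the successor map; policy.length + 1 rounds saturate it.
def pvSucc (policy : List (String × List String)) (goal : String) (u : String) : List String :=
  if u = goal then [] else pvPolGet policy u

def pvNext (policy : List (String × List String)) (goal : String) (s : List String) : List String :=
  s.foldl (fun acc u => (pvSucc policy goal u).foldl (fun acc v => PySem.Set.add acc v) acc) s

def pvClosure (policy : List (String × List String)) (goal : String) :
    Nat → List String → List String
  | 0, s => s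
  | k + 1, s => pvClosure policy goal k (pvNext policy goal s)

def Pre_reconstruct_all_paths (policy : List (String × List String)) (start : String) (goal : String) : Prop :=
  ((pvClosure policy goal (policy.length + 1) [start]).all
    (fun u => !((pvClosure policy goal (policy.length + 1) (pvSucc policy goal u)).contains u))) = true
instance (policy : List (String × List String)) (start : String) (goal : String) : Decidable (Pre_reconstruct_all_paths policy start goal) := by unfold Pre_reconstruct_all_paths; infer_instance

def pvWitness_reconstruct_all_paths : (List (String × List String)) × String × String :=
  ([("a", ["b", "c"]), ("b", ["c"])], "a", "c")

def Spec_reconstruct_all_paths (policy : List (String × List String)) (start : String) (goal : String) (out : List (List String)) : Prop := out = reconstruct_all_paths_alt policy start goal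
instance (policy : List (String × List String)) (start : String) (goal : String) (out : List (List String)) : Decidable (Spec_reconstruct_all_paths policy start goal out) := by unfold Spec_reconstruct_all_paths; infer_instance

-- ===== CLAIM =====
def Claim_equal_reconstruct_all_paths : Prop := ∀ (policy : List (String × List String)) (start : String) (goal : String), Dom_reconstruct_all_paths policy start goal → Pre_reconstruct_all_paths policy start goal → Spec_reconstruct_all_paths policy start goal (reconstruct_all_paths policy start goal)

-- ===== LEMMAS AND PROOFS =====

-- A's dfs only ever appends to the accumulator.
theorem pvDfsA_acc (policy : List (String × List String)) (goal : String) :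
    ∀ (f : Nat) (u : String) (current : List String) (paths : List (List String)),
      pvDfsA policy goal f u current paths
        = paths ++ pvDfsA policy goal f u current [] := by
  intro f
  induction f with
  | zero => intro u c p; by_cases h : u = goal <;> simp [pvDfsA, h]
  | succ f ih =>
    intro u c p
    by_cases h : u = goal
    · simp [pvDfsA, h]
    · simp only [pvDfsA, if_neg h]
      rw [PySem.List.foldl_congr_mem
            (g := fun acc v => acc ++ pvDfsA policy goal f v (c ++ [v]) [])
            (h := fun acc v _ => ih v (c ++ [v]) acc),
          PySem.List.foldl_append_eq_flatMap,
          PySem.List.foldl_congr_mem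
            (l := pvPolGet policy u) (init := ([] : List (List String)))
            (g := fun acc v => acc ++ pvDfsA policy goal f v (c ++ [v]) [])
            (h := fun acc v _ => ih v (c ++ [v]) acc),
          PySem.List.foldl_append_eq_flatMap]
      simp

-- One expansion step of A's dfs, accumulator-free form.
theorem pvDfsA_expand (policy : List (String × List String)) (goal : String)
    (f : Nat) (u : String) (current : List String) (h : u ≠ goal) :
    pvDfsA policy goal (f + 1) u current []
      = (pvPolGet policy u).flatMap (fun v => pvDfsA policy goal f v (current ++ [v]) []) := by
  simp only [pvDfsA, if_neg h]
  rw [PySem.List.foldl_congr_mem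
        (g := fun acc v => acc ++ pvDfsA policy goal f v (current ++ [v]) [])
        (h := fun acc v _ => pvDfsA_acc policy goal f v (current ++ [v]) acc),
      PySem.List.foldl_append_eq_flatMap]
  simp

-- Pushing a mapped list onto a cons-stack reverses it on top of the stack.
theorem pvPush_eq (mk : String → Nat × String × List String) :
    ∀ (l : List String) (st : List (Nat × String × List String)),
      l.foldl (fun st v => mk v :: st) st = (l.map mk).reverse ++ st := by
  intro l
  induction l with
  | nil => intro st; simp
  | cons v t ih => intro st; simp [List.foldl_cons, ih]

-- The stack machine B drains its stack entry by entry, each entry contributing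
-- exactly what A's dfs produces from that node, fuel and path.
theorem pvRunB_flat (policy : List (String × List String)) (goal : String) :
    ∀ (st : List (Nat × String × List String)),
      pvRunB policy goal st
        = st.flatMap (fun e => pvDfsA policy goal e.1 e.2.1 e.2.2 []) := by
  intro st
  induction st using pvRunB.induct policy goal with
  | case1 => simp [pvRunB]
  | case2 f path rest ih =>
    rw [pvRunB.eq_def]
    have hd : pvDfsA policy goal f goal path [] = [path] := by
      rw [pvDfsA.eq_def]; simp
    simp [ih, hd]
  | case3 u path rest h ih =>
    rw [pvRunB.eq_def]
    simp [ih, pvDfsA, h]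
  | case4 u path rest h f' ih =>
    rw [pvRunB.eq_def]
    simp only [if_neg h, Nat.succ_eq_add_one, List.flatMap_cons]
    rw [ih, pvPush_eq (fun v => (f', v, path ++ [v]))]
    simp only [List.flatMap_append, List.map_reverse, List.reverse_reverse,
      List.flatMap_map]
    rw [pvDfsA_expand policy goal f' u path h]

-- ===== VERDICT =====
theorem reconstruct_all_paths_spec : Claim_equal_reconstruct_all_paths := by
  intro policy start goal _ _
  unfold Spec_reconstruct_all_paths reconstruct_all_paths reconstruct_all_paths_alt
  rw [pvRunB_flat]
  simp
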